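-- pv_equiv track=rewrite | github.com/kaynaat007/mydspractice | ds/greedy/partition_labels.py | partition_v2
-- ===== SOURCE A (Python) =====
-- def partition_v2(s):
--     """
--
--     window based approach:  left and right pointer
--
--         approach is to observe that the length of window increases by farthest a char in the window can reach
--         to the right
--         so keep expanding the window as far right as possible
--         when you cannot extend it,
--         you will reach the current index == maximum right index
--         store the window length
--         update window left pointer to next index after current char
--
--     algorithm: ---
--
--     keep the right most index of each char
--     while traversing from left to right
--         keep track of maximum right index
--         if current index == maximum right index
--             record this length
--             and set left  =  current_index + 1
--     """
--
--     char_to_rightmost_index = {ch: i for i, ch in enumerate(s)}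
--     left = 0
--     right = 0
--     ans = []
--     for i, ch in enumerate(s):
--
--         right = max(right, char_to_rightmost_index[ch])
--         if i == right:
--             ans.append(right - left + 1)
--             left = i + 1
--     return ans
-- ===== SOURCE B (Python) =====
-- def partition_v2(s):
--     # Build per-character spans (first_index, last_index) in one pass,
--     # then merge overlapping spans in first-occurrence order.
--     spans = {}
--     for i, ch in enumerate(s):
--         spans[ch] = (spans[ch][0], i) if ch in spans else (i, i)
--     ans = []
--     cur = None
--     for (a, b) in spans.values():
--         if cur is None:
--             cur = (a, b)
--         elif a <= cur[1]:
--             cur = (cur[0], max(cur[1], b))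
--         else:
--             ans.append(cur[1] - cur[0] + 1)
--             cur = (a, b)
--     if cur is not None:
--         ans.append(cur[1] - cur[0] + 1)
--     return ans
-- ===== Notes on version B (the rewrite author's own statement) =====
-- stated objective: alternative
-- what changed: Replaces A's single greedy scan (running max of rightmost indices with in-loop cuts) by building a per-character (first_index,last_index) span dict in one pass and then merging overlapping spans in first-occurrence order.
import Mathlib
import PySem

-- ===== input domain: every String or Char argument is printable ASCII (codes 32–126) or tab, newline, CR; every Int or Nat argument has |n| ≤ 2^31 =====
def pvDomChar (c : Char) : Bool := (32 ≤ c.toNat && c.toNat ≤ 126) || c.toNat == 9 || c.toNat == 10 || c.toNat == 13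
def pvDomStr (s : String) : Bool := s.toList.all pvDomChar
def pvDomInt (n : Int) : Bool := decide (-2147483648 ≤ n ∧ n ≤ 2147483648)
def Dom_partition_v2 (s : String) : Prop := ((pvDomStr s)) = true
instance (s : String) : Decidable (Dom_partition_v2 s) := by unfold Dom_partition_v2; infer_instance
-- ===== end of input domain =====

-- B replaces A's single greedy left/right scan by building per-character (first,last) spans
-- and merging overlapping spans in first-occurrence order (objective: alternative; same cost).

-- ===== PORT A =====
def partition_v2 (s : String) : List Int :=
  let lc := s.toList
  -- char_to_rightmost_index = {ch: i for i, ch in enumerate(s)}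
  let d : PySem.Dict Char Int :=
    (PySem.List.enumerate lc 0).foldl (fun d p => d.insert p.2 p.1) PySem.Dict.empty
  -- left = 0; right = 0; ans = []; for i, ch in enumerate(s): ...
  -- d.getD p.2 0: the key is always present (every ch comes from s), the default is never used
  let st := (PySem.List.enumerate lc 0).foldl
    (fun (st : Int × Int × List Int) p =>
      let right := max st.2.1 (d.getD p.2 0)
      if p.1 = right then (p.1 + 1, right, st.2.2 ++ [right - st.1 + 1])
      else (st.1, right, st.2.2))
    (0, 0, [])
  st.2.2

-- ===== PORT B =====
def partition_v2_alt (s : String) : List Int :=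
  let lc := s.toList
  -- spans[ch] = (spans[ch][0], i) if ch in spans else (i, i)
  -- (d.getD p.2 (0,0)).1: under the 'contains' guard the key is present, the default is never used
  let spans : PySem.Dict Char (Int × Int) :=
    (PySem.List.enumerate lc 0).foldl
      (fun d p => d.insert p.2 (if d.contains p.2 then ((d.getD p.2 (0, 0)).1, p.1) else (p.1, p.1)))
      PySem.Dict.empty
  -- ans = []; cur = None; for (a, b) in spans.values(): ...
  let st : Option (Int × Int) × List Int :=
    spans.values.foldl
      (fun st ab =>
        match st.1 with
        | none => (some ab, st.2)
        | some c =>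
          if ab.1 ≤ c.2 then (some (c.1, max c.2 ab.2), st.2)
          else (some ab, st.2 ++ [c.2 - c.1 + 1]))
      (none, [])
  match st.1 with
  | none => st.2
  | some c => st.2 ++ [c.2 - c.1 + 1]

-- ===== PRECONDITION & SPEC =====
def Spec_partition_v2 (s : String) (out : List Int) : Prop := out = partition_v2_alt s
instance (s : String) (out : List Int) : Decidable (Spec_partition_v2 s out) := by unfold Spec_partition_v2; infer_instance

-- ===== CLAIM (what is proved, stated in full; the proofs are below) =====
def Claim_equal_partition_v2 : Prop := ∀ (s : String), Dom_partition_v2 s → Spec_partition_v2 s (partition_v2 s)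

-- ===== LEMMAS AND PROOFS =====

-- first index of c in l (meaningful when c ∈ l)
def fIdx : List Char → Char → Nat
  | [], _ => 0
  | x :: t, c => if x = c then 0 else fIdx t c + 1

-- last index of c in l (meaningful when c ∈ l)
def lIdx : List Char → Char → Nat
  | [], _ => 0
  | _ :: t, c => if c ∈ t then lIdx t c + 1 else 0

theorem fIdx_lt {l : List Char} {c : Char} (h : c ∈ l) : fIdx l c < l.length := by
  induction l with
  | nil => cases h
  | cons x t ih =>
    simp only [fIdx]
    split
    · simp
    · rename_i hx
      have hc : c ∈ t := by cases h with
        | head => exact absurd rfl hx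
        | tail _ h => exact h
      simpa using Nat.succ_lt_succ (ih hc)

theorem getElem_fIdx {l : List Char} {c : Char} (h : c ∈ l) :
    l[fIdx l c]'(fIdx_lt h) = c := by
  induction l with
  | nil => cases h
  | cons x t ih =>
    rcases Decidable.em (x = c) with hx | hx
    · simp [fIdx, hx]
    · have hc : c ∈ t := by cases h with
        | head => exact absurd rfl hx
        | tail _ h => exact h
      have := ih hc
      simp only [fIdx, hx, if_false]
      simpa using this

theorem fIdx_le {l : List Char} {c : Char} {i : Nat} (hi : i < l.length) (hc : l[i] = c) :
    fIdx l c ≤ i := by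
  induction l generalizing i with
  | nil => simp at hi
  | cons x t ih =>
    simp only [fIdx]
    split
    · simp
    · rename_i hx
      cases i with
      | zero => simp at hc; exact absurd hc hx
      | succ j =>
        have := ih (by simpa using hi) (by simpa using hc)
        omega

theorem lIdx_lt {l : List Char} {c : Char} (h : c ∈ l) : lIdx l c < l.length := by
  induction l with
  | nil => cases h
  | cons x t ih =>
    simp only [lIdx]
    split
    · rename_i ht; simpa using Nat.succ_lt_succ (ih ht)
    · simp

theorem le_lIdx {l : List Char} {c : Char} {i : Nat} (hi : i < l.length) (hc : l[i] = c) :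
    i ≤ lIdx l c := by
  induction l generalizing i with
  | nil => simp at hi
  | cons x t ih =>
    simp only [lIdx]
    cases i with
    | zero => omega
    | succ j =>
      have hj : j < t.length := by simpa using hi
      have hcj : t[j] = c := by simpa using hc
      have hmem : c ∈ t := hcj ▸ List.getElem_mem hj
      simp only [hmem, if_true]
      exact Nat.succ_le_succ (ih hj hcj)

theorem fIdx_append_of_mem {l l' : List Char} {c : Char} (h : c ∈ l) :
    fIdx (l ++ l') c = fIdx l c := by
  induction l with
  | nil => cases h
  | cons x t ih =>
    simp only [List.cons_append, fIdx]
    split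
    · rfl
    · rename_i hx
      have hc : c ∈ t := by cases h with
        | head => exact absurd rfl hx
        | tail _ h => exact h
      rw [ih hc]

theorem fIdx_append_of_not_mem {l l' : List Char} {c : Char} (h : c ∉ l) :
    fIdx (l ++ l') c = l.length + fIdx l' c := by
  induction l with
  | nil => simp
  | cons x t ih =>
    have hx : x ≠ c := fun hh => h (hh ▸ List.mem_cons_self)
    have ht : c ∉ t := fun hh => h (List.mem_cons_of_mem _ hh)
    simp only [List.cons_append, fIdx, hx, if_false, ih ht, List.length_cons]
    omega

-- the interval functions, as Ints
def Ffn (lc : List Char) (c : Char) : Int := (fIdx lc c : Int)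
def Lfn (lc : List Char) (c : Char) : Int := (lIdx lc c : Int)

-- the running maximum of L over a list, started at 0
def runMax (L : Char → Int) (l : List Char) : Int :=
  l.foldl (fun r c => max r (L c)) 0

theorem foldl_max_le (L : Char → Int) (l : List Char) {a X : Int} (ha : a ≤ X)
    (h : ∀ c ∈ l, L c ≤ X) : l.foldl (fun r c => max r (L c)) a ≤ X := by
  induction l generalizing a with
  | nil => simpa using ha
  | cons x t ih =>
    simp only [List.foldl_cons]
    exact ih (max_le ha (h x List.mem_cons_self)) (fun c hc => h c (List.mem_cons_of_mem _ hc))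

theorem runMax_le (L : Char → Int) {l : List Char} {X : Int} (h0 : 0 ≤ X)
    (h : ∀ c ∈ l, L c ≤ X) : runMax L l ≤ X :=
  foldl_max_le L l h0 h

theorem runMax_append (L : Char → Int) (l : List Char) (c : Char) :
    runMax L (l ++ [c]) = max (runMax L l) (L c) := by
  simp [runMax, List.foldl_append]

theorem runMax_take_succ (L : Char → Int) (l : List Char) {m : Nat} (hm : m < l.length) :
    runMax L (l.take (m + 1)) = max (runMax L (l.take m)) (L (l[m]'hm)) := by
  rw [List.take_add_one]
  have : l[m]?.toList = [l[m]'hm] := by simp [List.getElem?_eq_getElem hm]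
  rw [this, runMax_append]

theorem runMax_take_mono (L : Char → Int) (l : List Char) {a b : Nat} (h : a ≤ b) :
    runMax L (l.take a) ≤ runMax L (l.take b) := by
  have : l.take b = l.take a ++ ((l.drop a).take (b - a)) := by
    rw [← List.take_add, Nat.add_sub_cancel' h]
  rw [this]
  unfold runMax
  rw [List.foldl_append]
  exact (PySem.List.le_foldl_max_int ((l.drop a).take (b - a)) L _).1

-- A's loop body, with the dict lookup replaced by the function L
def stepA (L : Char → Int) (st : Int × Int × List Int) (p : Int × Char) : Int × Int × List Int :=
  let right := max st.2.1 (L p.2)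
  if p.1 = right then (p.1 + 1, right, st.2.2 ++ [right - st.1 + 1])
  else (st.1, right, st.2.2)

-- B's merge body
def stepB (st : Option (Int × Int) × List Int) (ab : Int × Int) : Option (Int × Int) × List Int :=
  match st.1 with
  | none => (some ab, st.2)
  | some c =>
    if ab.1 ≤ c.2 then (some (c.1, max c.2 ab.2), st.2)
    else (some ab, st.2 ++ [c.2 - c.1 + 1])

def stepBc (lc : List Char) (st : Option (Int × Int) × List Int) (c : Char) :
    Option (Int × Int) × List Int :=
  stepB st (Ffn lc c, Lfn lc c)

def finishB (st : Option (Int × Int) × List Int) : List Int :=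
  match st.1 with
  | none => st.2
  | some c => st.2 ++ [c.2 - c.1 + 1]

-- A's rightmost-index dict
theorem lastdict_get? (l : List Char) (s : Int) (d : PySem.Dict Char Int) (c : Char) :
    ((PySem.List.enumerate l s).foldl (fun d p => d.insert p.2 p.1) d).get? c
      = if c ∈ l then some (s + (lIdx l c : Int)) else d.get? c := by
  induction l generalizing s d with
  | nil => simp [PySem.List.enumerate_nil]
  | cons x t ih =>
    rw [PySem.List.enumerate_cons]
    simp only [List.foldl_cons]
    rw [ih]
    by_cases hct : c ∈ t
    · simp only [hct, if_true, List.mem_cons, or_true, lIdx]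
      congr 1
      push_cast
      ring
    · by_cases hcx : c = x
      · subst hcx
        simp [hct, lIdx, PySem.Dict.get?_insert_self]
      · rw [PySem.Dict.get?_insert_of_ne (hne := hcx)]
        simp [hct, hcx]

-- B's spans dict
theorem spans_get? (l : List Char) (s : Int) (d : PySem.Dict Char (Int × Int)) (c : Char) :
    ((PySem.List.enumerate l s).foldl
        (fun d p => d.insert p.2 (if d.contains p.2 then ((d.getD p.2 (0, 0)).1, p.1) else (p.1, p.1)))
        d).get? c
      = match d.get? c with
        | some v => some (v.1, if c ∈ l then s + (lIdx l c : Int) else v.2)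
        | none => if c ∈ l then some (s + (fIdx l c : Int), s + (lIdx l c : Int)) else none := by
  induction l generalizing s d with
  | nil => cases hdc : d.get? c <;> simp [PySem.List.enumerate_nil, hdc]
  | cons x t ih =>
    rw [PySem.List.enumerate_cons]
    simp only [List.foldl_cons]
    rw [ih]
    by_cases hcx : c = x
    · subst hcx
      have hd'c : (d.insert c (if d.contains c then ((d.getD c (0, 0)).1, s) else (s, s))).get? c
          = some (if d.contains c then ((d.getD c (0, 0)).1, s) else (s, s)) :=
        PySem.Dict.get?_insert_self ..
      rw [hd'c]
      cases hdc : d.get? c with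
      | some v =>
        have hcont : d.contains c = true := by
          rw [PySem.Dict.contains_eq_isSome_get?, hdc]; rfl
        have hgd : d.getD c (0, 0) = v := PySem.Dict.getD_of_get?_eq_some _ _ hdc
        simp only [hcont, if_true, hgd]
        by_cases hct : c ∈ t
        · simp only [hct, if_true, List.mem_cons, true_or, lIdx]
          congr 2
          push_cast
          ring
        · simp [hct, lIdx]
      | none =>
        have hcont : d.contains c = false := by
          rw [PySem.Dict.contains_eq_isSome_get?, hdc]; rfl
        simp only [hcont, if_false, Bool.false_eq_true]
        by_cases hct : c ∈ t
        · simp only [hct, if_true, List.mem_cons, true_or, lIdx, fIdx]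
          congr 2 <;> push_cast <;> ring
        · simp [hct, lIdx, fIdx]
    · have hd'c : (d.insert x (if d.contains x then ((d.getD x (0, 0)).1, s) else (s, s))).get? c
          = d.get? c := PySem.Dict.get?_insert_of_ne (hne := hcx) ..
      rw [hd'c]
      have hxc : ¬x = c := fun hh => hcx hh.symm
      have hfx : fIdx (x :: t) c = fIdx t c + 1 := by
        simp [fIdx, hxc]
      have hmem : (c ∈ x :: t) = (c ∈ t) := by
        simp [List.mem_cons, hcx]
      cases hdc : d.get? c with
      | some v =>
        by_cases hct : c ∈ t
        · simp only [hct, if_true, hmem, lIdx]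
          congr 2
          push_cast
          ring
        · simp [hct, hmem]
      | none =>
        by_cases hct : c ∈ t
        · simp only [hct, if_true, hmem, lIdx, hfx]
          congr 2 <;> push_cast <;> ring
        · simp [hct, hmem]

theorem values_eq_map {κ ν : Type} [BEq κ] [LawfulBEq κ] (d : PySem.Dict κ ν) (w : ν)
    (h : d.keys.Nodup) : d.values = d.keys.map (fun k => (d.get? k).getD w) := by
  have h2 : ∀ p ∈ d.items, (fun k => (d.get? k).getD w) p.1 = p.2 := by
    intro p hp
    have hg : d.get? p.1 = some p.2 :=
      PySem.Dict.get?_of_mem_items d (by simpa using hp) h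
    simp [hg]
  calc d.values = d.items.map (·.2) := rfl
    _ = d.items.map (fun p => (fun k => (d.get? k).getD w) p.1) := by
        exact (List.map_congr_left h2).symm
    _ = (d.items.map (·.1)).map (fun k => (d.get? k).getD w) := by rw [List.map_map]; rfl
    _ = d.keys.map (fun k => (d.get? k).getD w) := rfl

theorem set_update_append (l : List Char) (s : PySem.Set Char) :
    ∃ t, PySem.Set.update s l = s ++ t := by
  induction l generalizing s with
  | nil => exact ⟨[], by simp [PySem.Set.update]⟩
  | cons x t ih =>
    have hstep : PySem.Set.update s (x :: t) = PySem.Set.update (PySem.Set.add s x) t := rfl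
    rcases ih (PySem.Set.add s x) with ⟨u, hu⟩
    by_cases hx : x ∈ s
    · exact ⟨u, by rw [hstep, hu]; simp [PySem.Set.add, hx]⟩
    · exact ⟨x :: u, by rw [hstep, hu]; simp [PySem.Set.add, hx]⟩

theorem ofList_pairwise_fIdx (l : List Char) :
    (PySem.Set.ofList l).Pairwise (fun a b => fIdx l a < fIdx l b) := by
  induction l using List.reverseRecOn with
  | nil => simp [PySem.Set.ofList_eq_foldl]
  | append_singleton l x ih =>
    have hof : PySem.Set.ofList (l ++ [x]) = PySem.Set.add (PySem.Set.ofList l) x := by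
      rw [PySem.Set.ofList_eq_foldl, PySem.Set.ofList_eq_foldl, List.foldl_append]
      rfl
    by_cases hx : x ∈ l
    · have hmem : x ∈ PySem.Set.ofList l := (PySem.Set.mem_ofList ..).mpr hx
      rw [hof]
      have hadd : PySem.Set.add (PySem.Set.ofList l) x = PySem.Set.ofList l := by
        simp [PySem.Set.add, hmem]
      rw [hadd]
      refine ih.imp_of_mem ?_
      intro a b ha hb hab
      have ha' : a ∈ l := (PySem.Set.mem_ofList ..).mp ha
      have hb' : b ∈ l := (PySem.Set.mem_ofList ..).mp hb
      rw [fIdx_append_of_mem ha', fIdx_append_of_mem hb']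
      exact hab
    · have hmem : x ∉ PySem.Set.ofList l := fun hh => hx ((PySem.Set.mem_ofList ..).mp hh)
      rw [hof]
      have hadd : PySem.Set.add (PySem.Set.ofList l) x = PySem.Set.ofList l ++ [x] := by
        simp [PySem.Set.add, hmem]
      rw [hadd, List.pairwise_append]
      refine ⟨ih.imp_of_mem ?_, List.pairwise_singleton _ _, ?_⟩
      · intro a b ha hb hab
        have ha' : a ∈ l := (PySem.Set.mem_ofList ..).mp ha
        have hb' : b ∈ l := (PySem.Set.mem_ofList ..).mp hb
        rw [fIdx_append_of_mem ha', fIdx_append_of_mem hb']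
        exact hab
      · intro a ha b hb
        have ha' : a ∈ l := (PySem.Set.mem_ofList ..).mp ha
        have hb' : b = x := by simpa using hb
        subst hb'
        rw [fIdx_append_of_mem ha', fIdx_append_of_not_mem hx]
        have := fIdx_lt ha'
        omega

-- interior of a segment: the running right never changes, a single cut happens at the
-- last position a+k-1 iff r equals it
theorem segTail (lc : List Char) : ∀ (k a : Nat) (cs r : Int) (ans : List Int),
    a + k ≤ lc.length →
    (∀ j (hj : j < lc.length), a ≤ j → j < a + k → Lfn lc lc[j] ≤ r) →
    ((a : Int) + k - 1 ≤ r) →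
    (PySem.List.enumerate ((lc.drop a).take k) a).foldl (stepA (Lfn lc)) (cs, r, ans)
      = if k ≠ 0 ∧ r = (a : Int) + k - 1 then ((a : Int) + k, r, ans ++ [r - cs + 1])
        else (cs, r, ans) := by
  intro k
  induction k with
  | zero =>
    intro a cs r ans _ _ _
    simp [PySem.List.enumerate_nil]
  | succ k ih =>
    intro a cs r ans hlen hst hge
    have ha : a < lc.length := by omega
    have hdrop : lc.drop a = lc[a] :: lc.drop (a + 1) := List.drop_eq_getElem_cons ha
    rw [hdrop, List.take_succ_cons, PySem.List.enumerate_cons, List.foldl_cons]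
    have hmaxa : max r (Lfn lc (lc[a]'ha)) = r :=
      max_eq_left (hst a ha (le_refl a) (by omega))
    have hstep : stepA (Lfn lc) (cs, r, ans) ((a : Int), lc[a]'ha)
        = if (a : Int) = r then ((a : Int) + 1, r, ans ++ [r - cs + 1]) else (cs, r, ans) := by
      simp only [stepA, hmaxa]
    rw [hstep]
    rcases Nat.eq_zero_or_pos k with hk | hk
    · subst hk
      simp only [List.take_zero, PySem.List.enumerate_nil, List.foldl_nil]
      by_cases hr : (a : Int) = r
      · rw [if_pos hr, if_pos (by constructor <;> omega)]
        have : (a : Int) + 1 = (a : Int) + (1 : Nat) := by push_cast; ring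
        rw [← this]
      · rw [if_neg hr, if_neg (by push_cast; omega)]
    · have har : (a : Int) ≠ r := by push_cast at hge; omega
      rw [if_neg har]
      have hcast : (a : Int) + 1 = ((a + 1 : Nat) : Int) := by push_cast; ring
      rw [hcast, ih (a + 1) cs r ans (by omega)
        (fun j hj h1 h2 => hst j hj (by omega) (by omega))
        (by push_cast at hge ⊢; omega)]
      by_cases hr : r = (a : Int) + ((k + 1 : Nat) : Int) - 1
      · rw [if_pos ⟨hk.ne', by push_cast at hr ⊢; omega⟩, if_pos ⟨by omega, hr⟩]
        have : ((a + 1 : Nat) : Int) + (k : Nat) = (a : Int) + ((k + 1 : Nat) : Int) := by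
          push_cast; ring
        rw [this]
      · rw [if_neg (by push_cast at hr ⊢; omega), if_neg (by push_cast at hr ⊢; omega)]

-- a maximal segment: entering at position a with right = r, every char in [a, b)
-- reaching at most max r (L lc[a]); a single cut happens at b-1 iff the running max is b-1
theorem segFull (lc : List Char) (a b : Nat) (ha : a < b) (hb : b ≤ lc.length)
    (r cs : Int) (ans : List Int)
    (hst : ∀ j (hj : j < lc.length), a ≤ j → j < b →
      Lfn lc lc[j] ≤ max r (Lfn lc (lc[a]'(Nat.lt_of_lt_of_le ha hb))))
    (hge : (b : Int) - 1 ≤ max r (Lfn lc (lc[a]'(Nat.lt_of_lt_of_le ha hb)))) :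
    (PySem.List.enumerate ((lc.drop a).take (b - a)) a).foldl (stepA (Lfn lc)) (cs, r, ans)
      = (let ce := max r (Lfn lc (lc[a]'(Nat.lt_of_lt_of_le ha hb)));
         if ce = (b : Int) - 1 then ((b : Int), ce, ans ++ [ce - cs + 1]) else (cs, ce, ans)) := by
  have han : a < lc.length := Nat.lt_of_lt_of_le ha hb
  show _ = (if max r (Lfn lc (lc[a]'han)) = (b : Int) - 1
      then ((b : Int), max r (Lfn lc (lc[a]'han)), ans ++ [max r (Lfn lc (lc[a]'han)) - cs + 1])
      else (cs, max r (Lfn lc (lc[a]'han)), ans))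
  set ce := max r (Lfn lc (lc[a]'han)) with hce
  have hdrop : lc.drop a = lc[a] :: lc.drop (a + 1) := List.drop_eq_getElem_cons han
  have hk : b - a = (b - a - 1) + 1 := by omega
  rw [hk, hdrop, List.take_succ_cons, PySem.List.enumerate_cons, List.foldl_cons]
  have haL : (a : Int) ≤ Lfn lc (lc[a]'han) := by
    have := le_lIdx (l := lc) (c := lc[a]'han) han rfl
    unfold Lfn
    omega
  have hstep : stepA (Lfn lc) (cs, r, ans) ((a : Int), lc[a]'han)
      = if (a : Int) = ce then ((a : Int) + 1, ce, ans ++ [ce - cs + 1]) else (cs, ce, ans) := by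
    simp only [stepA, ← hce]
  rw [hstep]
  have hcast : (a : Int) + 1 = ((a + 1 : Nat) : Int) := by push_cast; ring
  by_cases hcut : (a : Int) = ce
  · have hb1 : b = a + 1 := by omega
    have hk0 : b - a - 1 = 0 := by omega
    rw [if_pos hcut, hk0]
    simp only [List.take_zero, PySem.List.enumerate_nil, List.foldl_nil]
    rw [if_pos (by omega : ce = (b : Int) - 1)]
    have : (a : Int) + 1 = (b : Int) := by omega
    rw [this]
  · rw [if_neg hcut, hcast,
      segTail lc (b - a - 1) (a + 1) cs ce ans (by omega)
        (fun j hj h1 h2 => hst j hj (by omega) (by omega))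
        (by push_cast; omega)]
    by_cases hc2 : ce = (b : Int) - 1
    · have hne : b - a - 1 ≠ 0 := by omega
      rw [if_pos ⟨hne, by push_cast; omega⟩, if_pos hc2]
      have : ((a + 1 : Nat) : Int) + ((b - a - 1 : Nat) : Int) = (b : Int) := by push_cast; omega
      rw [this]
    · rw [if_neg (by push_cast; omega), if_neg hc2]

theorem runMax_stable (lc : List Char) (a k : Nat) (hk : a + k ≤ lc.length)
    (h : ∀ j (hj : j < lc.length), a ≤ j → j < a + k →
          Lfn lc lc[j] ≤ runMax (Lfn lc) (lc.take a)) :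
    runMax (Lfn lc) (lc.take (a + k)) = runMax (Lfn lc) (lc.take a) := by
  induction k with
  | zero => rfl
  | succ k ih =>
    have hk' : a + k < lc.length := by omega
    rw [show a + (k+1) = (a + k) + 1 by omega, runMax_take_succ (Lfn lc) lc hk',
      ih (by omega) (fun j hj h1 h2 => h j hj h1 (by omega))]
    have := h (a+k) hk' (by omega) (by omega)
    omega

-- the main correspondence, one merged group / segment at a time
theorem core (lc : List Char) (rest : List Char) :
    ∀ (m : Nat) (cs : Int) (ans : List Int) (hm : m < lc.length),
    (∀ j (hj : j < lc.length), m ≤ j → fIdx lc lc[j] ≤ m ∨ lc[j] ∈ rest) →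
    (∀ c ∈ rest, m < fIdx lc c ∧ c ∈ lc) →
    rest.Pairwise (fun a b => fIdx lc a < fIdx lc b) →
    ((PySem.List.enumerate (lc.drop m) m).foldl (stepA (Lfn lc))
        (cs, runMax (Lfn lc) (lc.take m), ans)).2.2
      = finishB (rest.foldl (stepBc lc)
          (some (cs, max (runMax (Lfn lc) (lc.take m)) (Lfn lc (lc[m]'hm))), ans)) := by
  have hLle : ∀ (m : Nat) (hm : m < lc.length) (b : Nat), b ≤ lc.length →
      (∀ j (hj : j < lc.length), m ≤ j → j < b → fIdx lc lc[j] ≤ m) →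
      ∀ j (hj : j < lc.length), m ≤ j → j < b →
        Lfn lc lc[j] ≤ max (runMax (Lfn lc) (lc.take m)) (Lfn lc (lc[m]'hm)) := by
    intro m hm b hb hcv j hj hmj hjb
    have hgc : ∀ (i1 i2 : Nat) (h1 : i1 < lc.length) (h2 : i2 < lc.length),
        i1 = i2 → lc[i1]'h1 = lc[i2]'h2 := by
      intro i1 i2 h1 h2 h
      subst h
      rfl
    have hf := hcv j hj hmj hjb
    have hdin : lc[j] ∈ lc := List.getElem_mem hj
    have hflt : fIdx lc lc[j] < lc.length := fIdx_lt hdin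
    have hfeq : lc[fIdx lc lc[j]]'hflt = lc[j] := getElem_fIdx hdin
    rcases Nat.lt_or_ge (fIdx lc lc[j]) m with hlt | hge2
    · refine le_trans ?_ (le_max_left _ _)
      calc Lfn lc lc[j] = Lfn lc (lc[fIdx lc lc[j]]'hflt) := by rw [hfeq]
        _ ≤ runMax (Lfn lc) (lc.take (fIdx lc lc[j] + 1)) := by
            rw [runMax_take_succ (Lfn lc) lc hflt]
            exact le_max_right _ _
        _ ≤ runMax (Lfn lc) (lc.take m) := runMax_take_mono _ _ (by omega)
    · have hfm : fIdx lc lc[j] = m := le_antisymm hf hge2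
      have heq : lc[j] = lc[m]'hm := by
        rw [← hfeq]
        exact hgc _ _ _ _ hfm
      rw [heq]
      exact le_max_right _ _
  induction rest with
  | nil =>
    intro m cs ans hm hcov _ _
    have hcv : ∀ j (hj : j < lc.length), m ≤ j → j < lc.length → fIdx lc lc[j] ≤ m := by
      intro j hj h1 _
      rcases hcov j hj h1 with h | h
      · exact h
      · simp at h
    have hseg := hLle m hm lc.length le_rfl hcv
    have hub : max (runMax (Lfn lc) (lc.take m)) (Lfn lc (lc[m]'hm)) ≤ (lc.length : Int) - 1 := by
      apply max_le
      · apply runMax_le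
        · omega
        · intro c hc
          have hcin : c ∈ lc := List.mem_of_mem_take hc
          have := lIdx_lt hcin
          unfold Lfn
          omega
      · have := lIdx_lt (List.getElem_mem hm)
        unfold Lfn
        omega
    have hlb : (lc.length : Int) - 1 ≤ max (runMax (Lfn lc) (lc.take m)) (Lfn lc (lc[m]'hm)) := by
      have h1 := hseg (lc.length - 1) (by omega) (by omega) (by omega)
      have h2 : ((lc.length - 1 : Nat) : Int) ≤ Lfn lc (lc[lc.length - 1]'(by omega)) := by
        have := le_lIdx (l := lc) (c := lc[lc.length - 1]'(by omega)) (by omega) rfl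
        unfold Lfn
        omega
      omega
    have hcen : max (runMax (Lfn lc) (lc.take m)) (Lfn lc (lc[m]'hm)) = (lc.length : Int) - 1 :=
      le_antisymm hub hlb
    have hdm : lc.drop m = (lc.drop m).take (lc.length - m) :=
      (List.take_of_length_le (by simp)).symm
    rw [hdm, segFull lc m lc.length hm le_rfl _ cs ans hseg hlb]
    simp only [if_pos hcen, List.foldl_nil, finishB]
  | cons c' rest' ih =>
    intro m cs ans hm hcov hgt hsort
    obtain ⟨hmm', hc'in⟩ := hgt c' List.mem_cons_self
    have hm'n : fIdx lc c' < lc.length := fIdx_lt hc'in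
    have hc'e : lc[fIdx lc c']'hm'n = c' := getElem_fIdx hc'in
    have hpw := List.pairwise_cons.mp hsort
    have hcv : ∀ j (hj : j < lc.length), m ≤ j → j < fIdx lc c' → fIdx lc lc[j] ≤ m := by
      intro j hj h1 h2
      rcases hcov j hj h1 with h | h
      · exact h
      · exfalso
        have hle : fIdx lc lc[j] ≤ j := fIdx_le hj rfl
        rcases List.mem_cons.mp h with heq | hmem
        · rw [heq] at hle
          omega
        · have := hpw.1 _ hmem
          omega
    have hseg := hLle m hm (fIdx lc c') (le_of_lt hm'n) hcv
    have hRm' : runMax (Lfn lc) (lc.take (fIdx lc c'))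
        = max (runMax (Lfn lc) (lc.take m)) (Lfn lc (lc[m]'hm)) := by
      have h1 : runMax (Lfn lc) (lc.take (m + 1))
          = max (runMax (Lfn lc) (lc.take m)) (Lfn lc (lc[m]'hm)) :=
        runMax_take_succ (Lfn lc) lc hm
      have h2 := runMax_stable lc (m + 1) (fIdx lc c' - (m + 1)) (by omega)
        (fun j hj hj1 hj2 => by
          rw [h1]
          exact hseg j hj (by omega) (by omega))
      rw [show (m + 1) + (fIdx lc c' - (m + 1)) = fIdx lc c' by omega] at h2
      rw [h2, h1]
    have hlb : ((fIdx lc c' : Nat) : Int) - 1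
        ≤ max (runMax (Lfn lc) (lc.take m)) (Lfn lc (lc[m]'hm)) := by
      have h1 := hseg (fIdx lc c' - 1) (by omega) (by omega) (by omega)
      have h2 : ((fIdx lc c' - 1 : Nat) : Int) ≤ Lfn lc (lc[fIdx lc c' - 1]'(by omega)) := by
        have := le_lIdx (l := lc) (c := lc[fIdx lc c' - 1]'(by omega)) (by omega) rfl
        unfold Lfn
        omega
      omega
    have hLc' : ((fIdx lc c' : Nat) : Int) ≤ Lfn lc c' := by
      have := le_lIdx (l := lc) (c := c') hm'n hc'e
      unfold Lfn
      omega
    have hsplit : lc.drop m = (lc.drop m).take (fIdx lc c' - m) ++ lc.drop (fIdx lc c') := by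
      have hd : (lc.drop m).drop (fIdx lc c' - m) = lc.drop (fIdx lc c') := by
        rw [List.drop_drop]
        congr 1
        omega
      rw [← hd, List.take_append_drop]
    have hlen : ((lc.drop m).take (fIdx lc c' - m)).length = fIdx lc c' - m := by
      simp
      omega
    rw [hsplit, PySem.List.enumerate_append, List.foldl_append, hlen,
      (by omega : (m : Int) + ((fIdx lc c' - m : Nat) : Int) = ((fIdx lc c' : Nat) : Int)),
      segFull lc m (fIdx lc c') hmm' (le_of_lt hm'n) _ cs ans hseg hlb]
    -- IH side conditions at the new boundary
    have hcov' : ∀ j (hj : j < lc.length), fIdx lc c' ≤ j → fIdx lc lc[j] ≤ fIdx lc c' ∨ lc[j] ∈ rest' := by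
      intro j hj h1
      rcases hcov j hj (by omega) with h | h
      · exact Or.inl (by omega)
      · rcases List.mem_cons.mp h with heq | hmem
        · exact Or.inl (by rw [heq])
        · exact Or.inr hmem
    have hgt' : ∀ c ∈ rest', fIdx lc c' < fIdx lc c ∧ c ∈ lc := by
      intro c hc
      exact ⟨hpw.1 c hc, (hgt c (List.mem_cons_of_mem _ hc)).2⟩
    by_cases hcut : max (runMax (Lfn lc) (lc.take m)) (Lfn lc (lc[m]'hm)) = ((fIdx lc c' : Nat) : Int) - 1
    · simp only [if_pos hcut]
      have hBc : stepBc lc (some (cs, max (runMax (Lfn lc) (lc.take m)) (Lfn lc (lc[m]'hm))), ans) c'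
          = (some (((fIdx lc c' : Nat) : Int), Lfn lc c'),
             ans ++ [max (runMax (Lfn lc) (lc.take m)) (Lfn lc (lc[m]'hm)) - cs + 1]) := by
        simp only [stepBc, stepB, Ffn]
        rw [if_neg (by omega)]
      rw [List.foldl_cons, hBc]
      have hih := ih (fIdx lc c') ((fIdx lc c' : Nat) : Int)
        (ans ++ [max (runMax (Lfn lc) (lc.take m)) (Lfn lc (lc[m]'hm)) - cs + 1])
        hm'n hcov' hgt' hpw.2
      rw [hRm', hc'e] at hih
      have hmx : max (max (runMax (Lfn lc) (lc.take m)) (Lfn lc (lc[m]'hm))) (Lfn lc c') = Lfn lc c' :=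
        max_eq_right (by omega)
      rw [hmx] at hih
      exact hih
    · simp only [if_neg hcut]
      have hBc : stepBc lc (some (cs, max (runMax (Lfn lc) (lc.take m)) (Lfn lc (lc[m]'hm))), ans) c'
          = (some (cs, max (max (runMax (Lfn lc) (lc.take m)) (Lfn lc (lc[m]'hm))) (Lfn lc c')), ans) := by
        simp only [stepBc, stepB, Ffn]
        rw [if_pos (by omega)]
      rw [List.foldl_cons, hBc]
      have hih := ih (fIdx lc c') cs ans hm'n hcov' hgt' hpw.2
      rw [hRm', hc'e] at hih
      exact hih

theorem A_eq (s : String) :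
    partition_v2 s
      = ((PySem.List.enumerate s.toList 0).foldl (stepA (Lfn s.toList)) (0, 0, [])).2.2 := by
  simp only [partition_v2]
  refine congrArg (fun st : Int × Int × List Int => st.2.2) ?_
  apply PySem.List.foldl_congr_mem
  intro acc p hp
  have hp2 : p.2 ∈ s.toList := by
    rcases (PySem.List.mem_enumerate_iff ..).mp hp with ⟨k, hk, hpk⟩
    rw [hpk]
    exact List.getElem_mem hk
  have hget : ((PySem.List.enumerate s.toList 0).foldl (fun d p => d.insert p.2 p.1)
      PySem.Dict.empty).getD p.2 0 = Lfn s.toList p.2 := by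
    rw [PySem.Dict.getD_eq_get?_getD, lastdict_get?, if_pos hp2]
    simp [Lfn]
  simp only [stepA, hget]

theorem spans_keys (lc : List Char) :
    ((PySem.List.enumerate lc 0).foldl
      (fun d p => d.insert p.2 (if d.contains p.2 then ((d.getD p.2 (0, 0)).1, p.1) else (p.1, p.1)))
      PySem.Dict.empty).keys = PySem.Set.ofList lc := by
  rw [PySem.Dict.keys_foldl_insert_key (key := fun p : Int × Char => p.2)
      (f := fun d p => if d.contains p.2 then ((d.getD p.2 (0, 0)).1, p.1) else (p.1, p.1)),
    PySem.List.map_snd_enumerate, PySem.Dict.keys_empty, PySem.Set.ofList_eq_foldl]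
  rfl

theorem spans_nodup (lc : List Char) :
    ((PySem.List.enumerate lc 0).foldl
      (fun d p => d.insert p.2 (if d.contains p.2 then ((d.getD p.2 (0, 0)).1, p.1) else (p.1, p.1)))
      PySem.Dict.empty).keys.Nodup := by
  apply PySem.Dict.nodup_keys_foldl_insert_key
  exact PySem.Dict.nodup_keys_empty

theorem spans_values (lc : List Char) :
    ((PySem.List.enumerate lc 0).foldl
      (fun d p => d.insert p.2 (if d.contains p.2 then ((d.getD p.2 (0, 0)).1, p.1) else (p.1, p.1)))
      PySem.Dict.empty).values
      = (PySem.Set.ofList lc).map (fun c => (Ffn lc c, Lfn lc c)) := by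
  rw [values_eq_map _ (0, 0) (spans_nodup lc), spans_keys lc]
  apply List.map_congr_left
  intro c hc
  have hcin : c ∈ lc := (PySem.Set.mem_ofList ..).mp hc
  rw [spans_get?]
  simp [PySem.Dict.get?_empty, hcin, Ffn, Lfn]

theorem B_eq (s : String) :
    partition_v2_alt s
      = finishB ((PySem.Set.ofList s.toList).foldl (stepBc s.toList) (none, [])) := by
  simp only [partition_v2_alt]
  rw [spans_values s.toList, List.foldl_map]
  rfl

-- ===== VERDICT =====
theorem partition_v2_spec : Claim_equal_partition_v2 := by
  unfold Claim_equal_partition_v2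
  intro s _
  unfold Spec_partition_v2
  rw [A_eq s, B_eq s]
  generalize s.toList = lc
  rcases lc with _ | ⟨x, t⟩
  · simp [PySem.List.enumerate_nil, PySem.Set.ofList_eq_foldl, finishB]
  · obtain ⟨u, hu⟩ := set_update_append t [x]
    have hKu : PySem.Set.ofList (x :: t) = x :: u := by
      rw [PySem.Set.ofList_eq_foldl, List.foldl_cons]
      have hadd : PySem.Set.add ([] : PySem.Set Char) x = [x] := by
        simp [PySem.Set.add]
      rw [hadd, show List.foldl PySem.Set.add [x] t = PySem.Set.update [x] t from rfl, hu]
      rfl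
    have hpw := ofList_pairwise_fIdx (x :: t)
    rw [hKu] at hpw
    have hpwc := List.pairwise_cons.mp hpw
    have hx0 : fIdx (x :: t) x = 0 := by simp [fIdx]
    have h0lt : 0 < (x :: t).length := by simp
    have hcov : ∀ j (hj : j < (x :: t).length), 0 ≤ j →
        fIdx (x :: t) (x :: t)[j] ≤ 0 ∨ (x :: t)[j] ∈ u := by
      intro j hj _
      have hmem : (x :: t)[j] ∈ PySem.Set.ofList (x :: t) :=
        (PySem.Set.mem_ofList ..).mpr (List.getElem_mem hj)
      rw [hKu] at hmem
      rcases List.mem_cons.mp hmem with heq | hmem'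
      · exact Or.inl (by rw [heq, hx0])
      · exact Or.inr hmem'
    have hgt : ∀ c ∈ u, 0 < fIdx (x :: t) c ∧ c ∈ (x :: t) := by
      intro c hc
      refine ⟨?_, ?_⟩
      · have := hpwc.1 c hc
        omega
      · have : c ∈ PySem.Set.ofList (x :: t) := by
          rw [hKu]
          exact List.mem_cons_of_mem _ hc
        exact (PySem.Set.mem_ofList ..).mp this
    have hcore := core (x :: t) u 0 0 [] h0lt hcov hgt hpwc.2
    have hent : max (runMax (Lfn (x :: t)) ((x :: t).take 0)) (Lfn (x :: t) ((x :: t)[0]'h0lt))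
        = Lfn (x :: t) x := by
      have : (0 : Int) ≤ Lfn (x :: t) x := Int.natCast_nonneg _
      simp only [List.take_zero, List.getElem_cons_zero]
      rw [show runMax (Lfn (x :: t)) [] = 0 from rfl]
      omega
    rw [hent] at hcore
    simp only [List.drop_zero, List.take_zero, Nat.cast_zero,
      show runMax (Lfn (x :: t)) [] = 0 from rfl] at hcore
    rw [hKu, List.foldl_cons]
    have hB1 : stepBc (x :: t) (none, []) x = (some (0, Lfn (x :: t) x), []) := by
      simp [stepBc, stepB, Ffn, hx0]
    rw [hB1]
    exact hcore
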